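-- pv_equiv track=rewrite | github.com/Osg523/coding_practiceOsg | 프로그래머스/0/120880. 특이한 정렬/특이한 정렬.py | solution
-- ===== SOURCE A (Python) =====
-- def solution(numlist, n):
--     answer = []
--     dic = dict()
--     for i in numlist:
--         if abs(i-n) in dic:
--             dic[abs(i-n)] += [i]
--         else:
--             dic[abs(i-n)] = [i]
--     for i in sorted(dic):
--         answer += [j for j in sorted(dic[i], reverse = True)]
--     return answer
-- ===== SOURCE B (Python) =====
-- def solution(numlist, n):
--     return sorted(numlist, key=lambda x: (abs(x - n), -x))
-- ===== Notes on version B (the rewrite author's own statement) =====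
-- stated objective: idiomatic
-- what changed: Replaced the dict-of-buckets pipeline (group by distance, sort the keys, reverse-sort each bucket, concatenate) with a single stable sort on the composite key (abs(x-n), -x).
import Mathlib
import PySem

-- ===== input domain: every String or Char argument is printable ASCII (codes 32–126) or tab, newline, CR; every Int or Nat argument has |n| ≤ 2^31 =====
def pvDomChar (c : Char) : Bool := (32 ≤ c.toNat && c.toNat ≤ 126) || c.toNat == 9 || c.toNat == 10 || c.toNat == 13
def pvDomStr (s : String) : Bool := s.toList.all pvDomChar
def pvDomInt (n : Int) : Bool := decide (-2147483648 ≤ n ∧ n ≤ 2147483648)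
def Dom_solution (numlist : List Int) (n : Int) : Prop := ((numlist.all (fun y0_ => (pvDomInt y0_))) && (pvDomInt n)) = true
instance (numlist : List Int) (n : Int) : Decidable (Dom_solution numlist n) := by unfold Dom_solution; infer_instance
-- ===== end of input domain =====

-- B replaces A's dict bucketing + key sort + per-bucket reverse sorts by ONE sort on the key (abs(x-n), -x) (idiomatic).

-- ===== PORT A =====
-- literal port: dict build loop, then 'for i in sorted(dic): answer += [j for j in sorted(dic[i], reverse=True)]'
-- (dic[i] in the second loop is ported as getD _ []; exact there since every i is a key of dic)
def solution (numlist : List Int) (n : Int) : List Int :=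
  let dic : PySem.Dict Int (List Int) :=
    numlist.foldl (fun dic i =>
      if dic.contains |i - n| then dic.insert (|i - n|) (dic.getD (|i - n|) [] ++ [i])
      else dic.insert (|i - n|) [i]) PySem.Dict.empty
  (PySem.List.sorted dic.keys (fun k => k) false).foldl
    (fun answer i => answer ++ (PySem.List.sorted (dic.getD i []) (fun j => j) true).map (fun j => j)) []

-- ===== PORT B =====
def solution_alt (numlist : List Int) (n : Int) : List Int :=
  PySem.List.sorted2 numlist (fun x => |x - n|) (fun x => -x) false

-- ===== PRECONDITION & SPEC =====
def Spec_solution (numlist : List Int) (n : Int) (out : List Int) : Prop := out = solution_alt numlist n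
instance (numlist : List Int) (n : Int) (out : List Int) : Decidable (Spec_solution numlist n out) := by unfold Spec_solution; infer_instance

-- ===== CLAIM (what is proved, stated in full; the proofs are below) =====
def Claim_equal_solution : Prop := ∀ (numlist : List Int) (n : Int), Dom_solution numlist n → Spec_solution numlist n (solution numlist n)

-- ===== LEMMAS AND PROOFS =====

-- Python's lexicographic tuple comparison, as one Bool identity
theorem pvCmp_eq (da db a b : Int) :
    (decide (da < db) || (!decide (db < da) && decide (-a < -b)))
      = decide (da < db ∨ da = db ∧ (-a : Int) < -b) := by
  by_cases h1 : da < db <;> by_cases h2 : db < da <;> by_cases h3 : (-a : Int) < -b <;>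
    simp [h1, h2, h3] <;> omega

-- B's sort with tuple key is the sort whose key is the lexicographic pair.
theorem alt_eq_sorted_lex (numlist : List Int) (n : Int) :
    solution_alt numlist n
      = PySem.List.sorted numlist (fun x => toLex (|x - n|, -x)) false := by
  unfold solution_alt PySem.List.sorted2 PySem.List.sorted
  simp only [Bool.false_eq_true, if_false]
  congr 1
  funext acc x
  congr 1
  funext a b
  simp only [Prod.Lex.toLex_lt_toLex]
  exact pvCmp_eq (|a - n|) (|b - n|) a b

-- the bucket of distance k
def pvBucket (numlist : List Int) (n k : Int) : List Int :=
  numlist.filter (fun i => |i - n| == k)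

-- A's result, named: sorted distinct distances, each bucket reverse-sorted, concatenated.
theorem solution_eq_flatMap (numlist : List Int) (n : Int) :
    solution numlist n
      = (PySem.List.sorted (PySem.Set.ofList (numlist.map (fun i => |i - n|))) (fun k => k) false).flatMap
          (fun k => PySem.List.sorted (pvBucket numlist n k) (fun j => j) true) := by
  unfold solution
  have hstep : numlist.foldl (fun dic i =>
      if dic.contains |i - n| then dic.insert (|i - n|) (dic.getD (|i - n|) [] ++ [i])
      else dic.insert (|i - n|) [i]) PySem.Dict.empty
      = numlist.foldl (fun dic i => dic.modify (|i - n|) [] (fun v => v ++ [i])) PySem.Dict.empty := by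
    apply PySem.List.foldl_congr_mem
    intro d i _
    by_cases h : d.contains |i - n|
    · simp [h, PySem.Dict.modify]
    · have hc : d.contains |i - n| = false := by simpa using h
      simp [h, PySem.Dict.modify, PySem.Dict.getD_of_not_contains d _ hc]
  simp only [hstep]
  have hkeys : (numlist.foldl (fun dic i => dic.modify (|i - n|) [] (fun v => v ++ [i]))
      PySem.Dict.empty).keys = PySem.Set.ofList (numlist.map (fun i => |i - n|)) := by
    have := PySem.Dict.keys_foldl_insert_key (ν := List Int) numlist (fun i => |i - n|)
      (fun d i => d.getD (|i - n|) [] ++ [i]) PySem.Dict.empty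
    simpa [PySem.Dict.modify, PySem.Dict.keys_empty] using this
  have hget : ∀ k, (numlist.foldl (fun dic i => dic.modify (|i - n|) [] (fun v => v ++ [i]))
      PySem.Dict.empty).getD k [] = pvBucket numlist n k := by
    intro k
    have hmap : numlist.foldl (fun dic i => dic.modify (|i - n|) [] (fun v => v ++ [i]))
        PySem.Dict.empty
        = (numlist.map (fun i => ((|i - n| : Int), i))).foldl
            (fun d p => d.modify p.1 [] (fun v => v ++ [p.2])) PySem.Dict.empty := by
      rw [List.foldl_map]
    rw [hmap, PySem.Dict.getD_foldl_modify_append, List.filter_map]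
    simp [pvBucket, Function.comp_def]
  rw [PySem.List.foldl_append_eq_flatMap]
  rw [hkeys]
  simp only [List.nil_append, List.map_id_fun', id]
  exact List.flatMap_congr (fun k _ => by rw [hget k])

-- replacing each piece of a concatenation by a permutation gives a permutation
theorem flatMap_perm_congr {α β : Type} (D : List α) (f g : α → List β)
    (h : ∀ k ∈ D, (f k).Perm (g k)) : (D.flatMap f).Perm (D.flatMap g) := by
  induction D with
  | nil => simp
  | cons k D ih =>
      simp only [List.flatMap_cons]
      exact (h k (by simp)).append (ih (fun k' hk' => h k' (by simp [hk'])))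

-- inserting x into its (unique) bucket of a concatenation is a cons, up to permutation
theorem flatMap_cons_bucket_perm (key : Int → Int) (x : Int) (f : Int → List Int) :
    ∀ D : List Int, D.Nodup → key x ∈ D →
      (D.flatMap (fun k => if key x == k then x :: f k else f k)).Perm (x :: D.flatMap f) := by
  intro D
  induction D with
  | nil => intro _ h; simp at h
  | cons k D ih =>
      intro hnd hmem
      simp only [List.flatMap_cons]
      by_cases h : key x = k
      · have hne : ∀ k' ∈ D, ¬(key x == k') = true := by
          intro k' hk' hb
          have hk : k' = k := by rw [← beq_iff_eq.mp hb, h]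
          exact (List.nodup_cons.mp hnd).1 (hk ▸ hk')
        have hcongr : D.flatMap (fun k' => if key x == k' then x :: f k' else f k')
            = D.flatMap f := List.flatMap_congr (fun k' hk' => by simp [hne k' hk'])
        rw [hcongr, if_pos (by simpa using h)]
        simp
      · have hmem' : key x ∈ D := by
          rcases List.mem_cons.mp hmem with h' | h'
          · exact absurd h' h
          · exact h'
        rw [if_neg (by simpa using h)]
        exact ((ih (List.nodup_cons.mp hnd).2 hmem').append_left (f k)).trans List.perm_middle

-- the buckets of the distinct key values, concatenated, are a permutation of the list
theorem flatMap_buckets_perm (key : Int → Int) (D : List Int) (hnd : D.Nodup) :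
    ∀ xs : List Int, (∀ x ∈ xs, key x ∈ D) →
      (D.flatMap (fun k => xs.filter (fun i => key i == k))).Perm xs := by
  intro xs
  induction xs with
  | nil => intro _; simp
  | cons x xs ih =>
      intro hcov
      have h1 : D.flatMap (fun k => (x :: xs).filter (fun i => key i == k))
          = D.flatMap (fun k => if key x == k then x :: xs.filter (fun i => key i == k)
              else xs.filter (fun i => key i == k)) := by
        apply List.flatMap_congr
        intro k _
        by_cases h : (key x == k) = true <;> simp [h]
      rw [h1]
      exact ((flatMap_cons_bucket_perm key x _ D hnd (hcov x (by simp)))).trans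
        ((ih (fun y hy => hcov y (by simp [hy]))).cons x)

-- the lexicographic key used in the uniqueness argument
theorem pvKey_inj (n : Int) : Function.Injective (fun x : Int => toLex ((|x - n| : Int), -x)) := by
  intro a b h
  have h' := toLex.injective h
  have : -a = -b := congrArg Prod.snd h'
  omega

theorem solution_spec' (numlist : List Int) (n : Int) :
    solution numlist n = solution_alt numlist n := by
  rw [alt_eq_sorted_lex, solution_eq_flatMap]
  set key : Int → Lex (Int × Int) := fun x => toLex ((|x - n| : Int), -x) with hkey
  set D := PySem.List.sorted (PySem.Set.ofList (numlist.map (fun i => |i - n|))) (fun k => k) false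
    with hD
  have hDlt : D.Pairwise (· < ·) := PySem.List.sorted_ofList_pairwise_lt _
  have hDnd : D.Nodup := hDlt.imp (fun h => ne_of_lt h)
  have hbmem : ∀ k, ∀ x ∈ PySem.List.sorted (pvBucket numlist n k) (fun j => j) true,
      |x - n| = k ∧ x ∈ numlist := by
    intro k x hx
    have := (PySem.List.mem_sorted _ _ _ _).mp hx
    have h2 := List.mem_filter.mp this
    exact ⟨by simpa using h2.2, h2.1⟩
  -- permutation
  have hperm : (D.flatMap (fun k => PySem.List.sorted (pvBucket numlist n k) (fun j => j) true)).Perm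
      (PySem.List.sorted numlist key false) := by
    have h1 : ∀ k ∈ D, (PySem.List.sorted (pvBucket numlist n k) (fun j => j) true).Perm
        (pvBucket numlist n k) := fun k _ => PySem.List.sorted_perm _ _ _
    have hcov : ∀ x ∈ numlist, |x - n| ∈ D := by
      intro x hx
      rw [hD, PySem.List.mem_sorted, PySem.Set.mem_ofList]
      exact List.mem_map.mpr ⟨x, hx, rfl⟩
    exact ((flatMap_perm_congr D _ _ h1).trans
        (flatMap_buckets_perm (fun i => |i - n|) D hDnd numlist hcov)).trans
      (PySem.List.sorted_perm numlist key false).symm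
  -- A's list is pairwise sorted by the lexicographic key
  have hpA : (D.flatMap (fun k => PySem.List.sorted (pvBucket numlist n k) (fun j => j) true)).Pairwise
      (fun a b => key a ≤ key b) := by
    rw [List.pairwise_flatMap]
    constructor
    · intro k _
      have hrev := PySem.List.sorted_pairwise_rev (pvBucket numlist n k) (fun j => j)
      refine List.Pairwise.imp_of_mem ?_ hrev
      intro a b ha hb hle
      have hka := (hbmem k a ha).1
      have hkb := (hbmem k b hb).1
      rw [hkey]
      simp only [Prod.Lex.toLex_le_toLex]
      right
      exact ⟨by rw [hka, hkb], by omega⟩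
    · refine hDlt.imp_of_mem ?_
      intro k1 k2 _ _ hlt x hx y hy
      have hkx := (hbmem k1 x hx).1
      have hky := (hbmem k2 y hy).1
      rw [hkey]
      simp only [Prod.Lex.toLex_le_toLex]
      left
      rw [hkx, hky]; exact hlt
  exact PySem.List.eq_of_perm_of_pairwise_le_of_injective key (pvKey_inj n) hperm hpA
    (PySem.List.sorted_pairwise numlist key)

-- ===== VERDICT (by name: the statement is the Claim_ definition above) =====
theorem solution_spec : Claim_equal_solution := by
  intro numlist n _
  exact solution_spec' numlist n
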